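-- pv_equiv track=rewrite | github.com/youssefmourad1/sql_table_nlp | backup.py | extract_colomus
-- ===== SOURCE A (Python) =====
-- def extract_colomus(text):
--      words=text.split()
--      entry_prices =[]
--      take_profit_prices =[]
--      stop_loss =[]
--      for i,word in enumerate(words):
--           if word=='tp':
--                try:
--                     take_profit_prices.append(words[i+1])
--                except:
--                     pass
--           elif word=='sl':
--                try:
--                     stop_loss.append(words[i+1])
--                except:
--                     pass
--      index=0
--      while  index<len(words) and words[index]!='tp' and words[index]!='sl' :
--           entry_prices.append(words[index])
--           index+=1
--      return entry_prices,take_profit_prices,stop_loss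
-- ===== SOURCE B (Python) =====
-- def extract_colomus(text):
--     # single left-to-right pass: a state machine carrying the previous word and
--     # a flag for whether we are still in the leading entry-price segment
--     take_profit_prices = []
--     stop_loss = []
--     entry_prices = []
--     collecting = True
--     prev = None
--     for w in text.split():
--         if prev == 'tp':
--             take_profit_prices.append(w)
--         elif prev == 'sl':
--             stop_loss.append(w)
--         if w == 'tp' or w == 'sl':
--             collecting = False
--         elif collecting:
--             entry_prices.append(w)
--         prev = w
--     return entry_prices, take_profit_prices, stop_loss
-- ===== Notes on version B (the rewrite author's own statement) =====
-- stated objective: alternative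
-- what changed: Replaced A's two staged passes (an enumerate loop doing words[i+1] lookahead under try/except, then a separate while-loop index scan for the prefix) by one single left-to-right pass: a state machine carrying the previous word (so no index arithmetic or exception guard is needed) and a boolean flag that switches off entry collection at the first marker.
import Mathlib
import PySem

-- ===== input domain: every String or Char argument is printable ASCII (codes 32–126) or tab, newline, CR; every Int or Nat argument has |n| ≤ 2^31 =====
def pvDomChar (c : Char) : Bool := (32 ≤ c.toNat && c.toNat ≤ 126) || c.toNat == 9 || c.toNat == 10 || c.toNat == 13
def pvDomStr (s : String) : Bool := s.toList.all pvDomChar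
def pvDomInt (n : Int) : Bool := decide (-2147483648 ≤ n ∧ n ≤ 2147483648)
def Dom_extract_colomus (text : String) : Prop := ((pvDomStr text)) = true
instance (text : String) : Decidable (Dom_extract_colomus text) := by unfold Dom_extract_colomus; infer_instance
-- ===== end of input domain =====

-- B replaces A's two staged passes (enumerate loop with words[i+1] lookahead, then a while-loop prefix scan) by one single-pass state machine carrying the previous word and a collecting flag; objective: alternative decomposition, same cost.


-- ===== PORT A =====
-- one step of A's 'for i, word in enumerate(words)' loop; the bare except catches
-- exactly the IndexError of words[i+1] (pyGet? = none), where it appends nothing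
def extractStep (words : List String) (st : List String × List String)
    (iw : Int × String) : List String × List String :=
  if iw.2 == "tp" then
    match PySem.List.pyGet? words (iw.1 + 1) with
    | some w => (st.1 ++ [w], st.2)
    | none => st
  else if iw.2 == "sl" then
    match PySem.List.pyGet? words (iw.1 + 1) with
    | some w => (st.1, st.2 ++ [w])
    | none => st
  else st

-- A's trailing 'while' loop collecting entry_prices
def entryLoop (words : List String) (index : Nat) (acc : List String) : List String :=
  if h : index < words.length then
    if words[index] ≠ "tp" ∧ words[index] ≠ "sl" then
      entryLoop words (index + 1) (acc ++ [words[index]])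
    else acc
  else acc
termination_by words.length - index

def extract_colomus (text : String) : List String × List String × List String :=
  let words := PySem.Str.split₀ text
  let tpsl := (PySem.List.enumerate words).foldl (extractStep words) ([], [])
  let entry_prices := entryLoop words 0 []
  (entry_prices, tpsl.1, tpsl.2)

-- ===== PORT B =====
-- one step of B's single pass: state = (tp, sl, entry, collecting, prev)
def altStep (st : List String × List String × List String × Bool × Option String)
    (w : String) : List String × List String × List String × Bool × Option String :=
  match st with
  | (tp, sl, entry, coll, prev) =>
    let tp' := if prev == some "tp" then tp ++ [w] else tp
    let sl' := if prev == some "sl" then sl ++ [w] else sl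
    let marker := w == "tp" || w == "sl"
    let entry' := if !marker && coll then entry ++ [w] else entry
    (tp', sl', entry', coll && !marker, some w)

def extract_colomus_alt (text : String) : List String × List String × List String :=
  let words := PySem.Str.split₀ text
  match words.foldl altStep ([], [], [], true, none) with
  | (tp, sl, entry, _, _) => (entry, tp, sl)

-- ===== PRECONDITION & SPEC =====
def Spec_extract_colomus (text : String) (out : List String × List String × List String) : Prop := out = extract_colomus_alt text
instance (text : String) (out : List String × List String × List String) : Decidable (Spec_extract_colomus text out) := by unfold Spec_extract_colomus; infer_instance

-- ===== CLAIM (what is proved, stated in full; the proofs are below) =====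
def Claim_equal_extract_colomus : Prop := ∀ (text : String), Dom_extract_colomus text → Spec_extract_colomus text (extract_colomus text)

-- ===== LEMMAS AND PROOFS =====

-- A's enumerate fold over a suffix of ws equals pair comprehensions over that suffix
theorem extractStep_fold (ws : List String) :
    ∀ (suf : List String) (k : Nat) (accT accS : List String), suf = ws.drop k →
      (PySem.List.enumerate suf (k : Int)).foldl (extractStep ws) (accT, accS)
        = (accT ++ (suf.zip suf.tail).filterMap (fun p => if p.1 == "tp" then some p.2 else none),
           accS ++ (suf.zip suf.tail).filterMap (fun p => if p.1 == "sl" then some p.2 else none)) := by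
  intro suf
  induction suf with
  | nil => intro k accT accS h; simp [PySem.List.enumerate]
  | cons w rest ih =>
    intro k accT accS h
    have hrest : rest = ws.drop (k + 1) := by
      have := congrArg List.tail h
      simpa [List.tail_drop] using this
    have hget : PySem.List.pyGet? ws ((k : Int) + 1) = rest.head? := by
      have : ((k : Int) + 1) = ((k + 1 : Nat) : Int) := by push_cast; ring
      rw [this, PySem.List.pyGet?_natCast, ← List.head?_drop, ← hrest]
    rw [PySem.List.enumerate_cons, List.foldl_cons]
    have hcast : (k : Int) + 1 = ((k + 1 : Nat) : Int) := by push_cast; ring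
    cases rest with
    | nil =>
      have hstep : extractStep ws (accT, accS) ((k : Int), w) = (accT, accS) := by
        simp only [extractStep, hget, List.head?_nil]
        split_ifs <;> rfl
      rw [hstep]
      simp [PySem.List.enumerate]
    | cons r rs =>
      have hd : PySem.List.pyGet? ws ((k : Int) + 1) = some r := by
        rw [hget]; rfl
      have hrec := fun aT aS => ih (k + 1) aT aS hrest
      by_cases htp : w = "tp"
      · have hstep : extractStep ws (accT, accS) ((k : Int), w) = (accT ++ [r], accS) := by
          simp [extractStep, htp, hd]
        rw [hstep, hcast, hrec]
        simp [htp]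
      · by_cases hsl : w = "sl"
        · have hstep : extractStep ws (accT, accS) ((k : Int), w) = (accT, accS ++ [r]) := by
            simp [extractStep, hsl, hd]
          rw [hstep, hcast, hrec]
          simp [hsl]
        · have hstep : extractStep ws (accT, accS) ((k : Int), w) = (accT, accS) := by
            simp [extractStep, htp, hsl]
          rw [hstep, hcast, hrec]
          simp [htp, hsl]

-- A's while loop over the suffix from k equals takeWhile on that suffix
theorem entryLoop_eq (ws : List String) :
    ∀ (suf : List String) (k : Nat) (acc : List String), suf = ws.drop k →
      entryLoop ws k acc = acc ++ suf.takeWhile (fun w => !(w == "tp" || w == "sl")) := by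
  intro suf
  induction suf with
  | nil =>
    intro k acc h
    have hk : ws.length ≤ k := by
      by_contra hlt
      push Not at hlt
      have : ws.drop k ≠ [] := by simp [List.drop_eq_nil_iff]; omega
      exact this h.symm
    rw [entryLoop]
    simp [Nat.not_lt.mpr hk]
  | cons w rest ih =>
    intro k acc h
    have hk : k < ws.length := by
      by_contra hge
      push Not at hge
      simp [List.drop_eq_nil_of_le hge] at h
    have hw : ws[k] = w := by
      have h0 : ws[k]? = some w := by rw [← List.head?_drop, ← h]; rfl
      have h1 : ws[k]? = some ws[k] := List.getElem?_eq_getElem hk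
      rw [h0] at h1; exact (Option.some.inj h1).symm
    rw [entryLoop]
    simp only [hk, dif_pos, hw]
    by_cases htp : w = "tp"
    · simp [htp]
    · by_cases hsl : w = "sl"
      · simp [hsl]
      · have := ih (k + 1) (acc ++ [w]) (by
          have := congrArg List.tail h
          simpa [List.tail_drop] using this)
        simp [htp, hsl, this]

-- B's fold, started with previous word p, computed in closed form
theorem altStep_fold :
    ∀ (ws : List String) (p : String) (tp0 sl0 e0 : List String) (coll : Bool),
      ws.foldl altStep (tp0, sl0, e0, coll, some p)
        = (tp0 ++ ((p :: ws).zip ws).filterMap (fun q => if q.1 == "tp" then some q.2 else none),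
           sl0 ++ ((p :: ws).zip ws).filterMap (fun q => if q.1 == "sl" then some q.2 else none),
           (if coll then e0 ++ ws.takeWhile (fun w => !(w == "tp" || w == "sl")) else e0),
           coll && ws.all (fun w => !(w == "tp" || w == "sl")),
           some (ws.getLastD p)) := by
  intro ws
  induction ws with
  | nil => intro p tp0 sl0 e0 coll; cases coll <;> simp
  | cons w rest ih =>
    intro p tp0 sl0 e0 coll
    rw [List.foldl_cons]
    by_cases hm : (w == "tp" || w == "sl") = true
    · -- marker word: collecting switches off
      have hstep : altStep (tp0, sl0, e0, coll, some p) w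
          = ((if p == "tp" then tp0 ++ [w] else tp0),
             (if p == "sl" then sl0 ++ [w] else sl0), e0, false, some w) := by
        simp [altStep, hm]
      rw [hstep, ih]
      cases coll <;> split_ifs <;>
        simp_all [List.zip_cons_cons, List.takeWhile_cons, List.getLast?_cons,
          List.getLastD_eq_getLast?] <;> tauto
    · have hstep : altStep (tp0, sl0, e0, coll, some p) w
          = ((if p == "tp" then tp0 ++ [w] else tp0),
             (if p == "sl" then sl0 ++ [w] else sl0),
             (if coll then e0 ++ [w] else e0), coll, some w) := by
        cases coll <;> simp [altStep, hm]
      rw [hstep, ih]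
      cases coll <;> split_ifs <;>
        simp_all [List.zip_cons_cons, List.getLast?_cons, List.getLastD_eq_getLast?]

-- ===== VERDICT (by name: the statement is the Claim_ definition above) =====
theorem extract_colomus_spec : Claim_equal_extract_colomus := by
  intro text _
  unfold Spec_extract_colomus
  simp only [extract_colomus, extract_colomus_alt]
  cases hws : PySem.Str.split₀ text with
  | nil => simp [entryLoop, PySem.List.enumerate]
  | cons w rest =>
    have h1 := extractStep_fold (w :: rest) (w :: rest) 0 [] [] (by simp)
    have h2 := entryLoop_eq (w :: rest) (w :: rest) 0 [] (by simp)
    simp only [Nat.cast_zero] at h1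
    simp only [h1, h2, List.foldl_cons]
    by_cases hm : (w == "tp" || w == "sl") = true
    · have hstep : altStep ([], [], [], true, none) w = ([], [], [], false, some w) := by
        simp [altStep, hm]
      rw [hstep, altStep_fold]
      have hm' := hm
      simp at hm'
      simp [List.takeWhile_cons]
      tauto
    · have hstep : altStep ([], [], [], true, none) w = ([], [], [w], true, some w) := by
        simp [altStep, hm]
      rw [hstep, altStep_fold]
      have hm' := hm
      simp at hm'
      simp [List.takeWhile_cons]
      tauto
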